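-- pv_equiv track=rewrite | github.com/AlanMet/Patchwork | 2203391.py | getColour
-- ===== SOURCE A (Python) =====
-- def getColour(size, choices):
--     colours = []
--     for y in range(size):
--         for x in range(size):
--             if size-1>y>0 and size-1>x>0:
--                 colours.append(choices[2])
--             elif y%2 == 0:
--                 if x%2==0:
--                     colours.append(choices[0])
--                 else:
--                     colours.append(choices[1])
--             else:
--                 if x%2==0:
--                     colours.append(choices[1])
--                 else:
--                     colours.append(choices[0])
--     return colours
-- ===== SOURCE B (Python) =====
-- def getColour(size, choices):
--     # Row-based construction: two checkerboard edge rows, interior rows are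
--     # edge cell + (size-2) filler cells + edge cell.
--     if size <= 0:
--         return []
--     def edge_row(y):
--         return [choices[(x + y) % 2] for x in range(size)]
--     colours = edge_row(0)
--     for y in range(1, size - 1):
--         colours += [choices[y % 2]] + [choices[2]] * (size - 2) + [choices[(size - 1 + y) % 2]]
--     if size > 1:
--         colours += edge_row(size - 1)
--     return colours
-- ===== Notes on version B (the rewrite author's own statement) =====
-- stated objective: alternative
-- what changed: Replaces the per-cell nested x/y loop with per-if tests by a row decomposition: checkerboard edge rows built by comprehension and interior rows assembled as edge cell + a replicated filler block + edge cell.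
import Mathlib
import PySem

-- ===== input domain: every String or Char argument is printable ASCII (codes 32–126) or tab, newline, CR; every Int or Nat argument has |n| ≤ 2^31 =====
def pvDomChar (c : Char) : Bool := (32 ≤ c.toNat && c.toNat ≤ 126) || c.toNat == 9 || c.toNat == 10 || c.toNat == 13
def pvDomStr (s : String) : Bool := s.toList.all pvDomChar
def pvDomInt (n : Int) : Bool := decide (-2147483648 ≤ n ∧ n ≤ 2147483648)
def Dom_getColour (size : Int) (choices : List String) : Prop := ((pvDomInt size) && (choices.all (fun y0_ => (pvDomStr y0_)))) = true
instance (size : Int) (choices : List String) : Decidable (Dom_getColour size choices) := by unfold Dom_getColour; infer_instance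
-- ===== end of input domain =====

-- B builds the grid row by row (edge rows as checkerboards, interior rows as edge+filler+edge)
-- instead of A's per-cell nested loop; same cost, different decomposition.

-- ===== PORT A =====
-- loop body of A's inner loop, as a helper
def cellA (size : Int) (choices : List String) (y x : Int) : String :=
  if size - 1 > y ∧ y > 0 ∧ size - 1 > x ∧ x > 0 then
    PySem.List.pyGetD choices 2 ""
  else if PySem.Int.mod y 2 = 0 then
    (if PySem.Int.mod x 2 = 0 then PySem.List.pyGetD choices 0 "" else PySem.List.pyGetD choices 1 "")
  else
    (if PySem.Int.mod x 2 = 0 then PySem.List.pyGetD choices 1 "" else PySem.List.pyGetD choices 0 "")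

def getColour (size : Int) (choices : List String) : List String :=
  (PySem.List.pyRange 0 size 1).foldl (fun colours y =>
    (PySem.List.pyRange 0 size 1).foldl (fun colours x =>
      colours ++ [cellA size choices y x]) colours) []

-- ===== PORT B =====
def edgeRow (size : Int) (choices : List String) (y : Int) : List String :=
  (PySem.List.pyRange 0 size 1).map (fun x => PySem.List.pyGetD choices (PySem.Int.mod (x + y) 2) "")

def getColour_alt (size : Int) (choices : List String) : List String :=
  if size ≤ 0 then []
  else
    let colours := edgeRow size choices 0
    let colours := (PySem.List.pyRange 1 (size - 1) 1).foldl (fun colours y =>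
      colours ++ ([PySem.List.pyGetD choices (PySem.Int.mod y 2) ""]
        ++ List.replicate (size - 2).toNat (PySem.List.pyGetD choices 2 "")
        ++ [PySem.List.pyGetD choices (PySem.Int.mod (size - 1 + y) 2) ""])) colours
    if size > 1 then colours ++ edgeRow size choices (size - 1) else colours

-- ===== PRECONDITION & SPEC =====
-- Pre_ excludes exactly the inputs where A raises IndexError: choices shorter than the
-- indices a grid of this size reads (index 0 for size=1, 0..1 for size=2, 0..2 for size≥3).
def Pre_getColour (size : Int) (choices : List String) : Prop :=
  size ≤ 0 ∨ min size 3 ≤ (choices.length : Int)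
instance (size : Int) (choices : List String) : Decidable (Pre_getColour size choices) := by
  unfold Pre_getColour; infer_instance

def pvWitness_getColour : Int × List String := (3, ["a", "b", "c"])

def Spec_getColour (size : Int) (choices : List String) (out : List String) : Prop := out = getColour_alt size choices
instance (size : Int) (choices : List String) (out : List String) : Decidable (Spec_getColour size choices out) := by unfold Spec_getColour; infer_instance

-- ===== CLAIM (what is proved, stated in full; the proofs are below) =====
def Claim_equal_getColour : Prop := ∀ (size : Int) (choices : List String), Dom_getColour size choices → Pre_getColour size choices → Spec_getColour size choices (getColour size choices)

-- ===== LEMMAS AND PROOFS =====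

-- A's nested appending loops collapse to a flatMap of rows
theorem getColour_eq_flatMap (size : Int) (choices : List String) :
    getColour size choices
      = (PySem.List.pyRange 0 size 1).flatMap
          (fun y => (PySem.List.pyRange 0 size 1).map (cellA size choices y)) := by
  simp only [getColour, PySem.List.foldl_append_singleton_eq_map,
    PySem.List.foldl_append_eq_flatMap, List.nil_append]

-- on any non-interior cell A computes the checkerboard colour choices[(x+y)%2]
theorem cellA_edge (size : Int) (choices : List String) (y x : Int)
    (h : ¬ (size - 1 > y ∧ y > 0 ∧ size - 1 > x ∧ x > 0)) :
    cellA size choices y x = PySem.List.pyGetD choices (PySem.Int.mod (x + y) 2) "" := by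
  unfold cellA
  rw [if_neg h]
  rw [PySem.Int.mod_eq_emod_of_pos (a := y) (by norm_num),
      PySem.Int.mod_eq_emod_of_pos (a := x) (by norm_num),
      PySem.Int.mod_eq_emod_of_pos (a := x + y) (by norm_num)]
  rcases Int.emod_two_eq x with hx | hx <;> rcases Int.emod_two_eq y with hy | hy
  · have hxy : (x + y) % 2 = 0 := by omega
    simp [hx, hy, hxy]
  · have hxy : (x + y) % 2 = 1 := by omega
    simp [hx, hy, hxy]
  · have hxy : (x + y) % 2 = 1 := by omega
    simp [hx, hy, hxy]
  · have hxy : (x + y) % 2 = 0 := by omega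
    simp [hx, hy, hxy]

-- an interior row of A is edge cell + filler block + edge cell
theorem rowA_interior (size : Int) (choices : List String) (y : Int)
    (hy0 : 0 < y) (hy1 : y < size - 1) :
    (PySem.List.pyRange 0 size 1).map (cellA size choices y)
      = [PySem.List.pyGetD choices (PySem.Int.mod y 2) ""]
        ++ List.replicate (size - 2).toNat (PySem.List.pyGetD choices 2 "")
        ++ [PySem.List.pyGetD choices (PySem.Int.mod (size - 1 + y) 2) ""] := by
  have h1 : PySem.List.pyRange 0 size 1
      = PySem.List.pyRange 0 1 1 ++ (PySem.List.pyRange 1 (size - 1) 1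
        ++ PySem.List.pyRange (size - 1) size 1) := by
    rw [← PySem.List.pyRange_one_append 1 (size - 1) size (by omega) (by omega)]
    exact PySem.List.pyRange_one_append 0 1 size (by omega) (by omega)
  have h2 : PySem.List.pyRange 0 1 1 = [0] := by
    simpa using PySem.List.pyRange_one_singleton 0
  have h3 : PySem.List.pyRange (size - 1) size 1 = [size - 1] := by
    have := PySem.List.pyRange_one_singleton (size - 1)
    simpa [sub_add_cancel] using this
  have hmid : (PySem.List.pyRange 1 (size - 1) 1).map (cellA size choices y)
      = List.replicate (size - 2).toNat (PySem.List.pyGetD choices 2 "") := by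
    rw [List.map_congr_left (g := fun _ => PySem.List.pyGetD choices 2 "")
        (fun x hx => by
          have hx' := (PySem.List.mem_pyRange_one).1 hx
          unfold cellA
          rw [if_pos ⟨by omega, by omega, by omega, by omega⟩])]
    rw [List.map_const', PySem.List.length_pyRange_one]
    congr 1
    omega
  rw [h1, List.map_append, List.map_append, h2, h3, hmid]

  have e0 : cellA size choices y 0
      = PySem.List.pyGetD choices (PySem.Int.mod y 2) "" := by
    have := cellA_edge size choices y 0 (by omega)
    simpa using this
  have e1 : cellA size choices y (size - 1)
      = PySem.List.pyGetD choices (PySem.Int.mod (size - 1 + y) 2) "" := by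
    have := cellA_edge size choices y (size - 1) (by omega)
    simpa using this
  simp [e0, e1]

-- an edge row of A is the checkerboard row
theorem rowA_edge (size : Int) (choices : List String) (y : Int)
    (hy : y = 0 ∨ y = size - 1) :
    (PySem.List.pyRange 0 size 1).map (cellA size choices y)
      = edgeRow size choices y := by
  unfold edgeRow
  exact List.map_congr_left (fun x hx => cellA_edge size choices y x (by omega))

-- ===== VERDICT (by name: the statement is the Claim_ definition above) =====
theorem getColour_spec : Claim_equal_getColour := by
  intro size choices _ _
  unfold Spec_getColour
  rw [getColour_eq_flatMap]
  by_cases h0 : size ≤ 0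
  · simp [getColour_alt, h0, PySem.List.pyRange_one_eq_nil (by omega : size ≤ (0:Int))]
  · by_cases h1 : size = 1
    · subst h1
      simp [getColour_alt, edgeRow]
      rw [show PySem.List.pyRange 0 1 1 = [0] by simpa using PySem.List.pyRange_one_singleton 0]
      simp [cellA_edge 1 choices 0 0 (by omega)]
    · -- size ≥ 2
      have hsplit : PySem.List.pyRange 0 size 1
          = PySem.List.pyRange 0 1 1 ++ (PySem.List.pyRange 1 (size - 1) 1
            ++ PySem.List.pyRange (size - 1) size 1) := by
        rw [← PySem.List.pyRange_one_append 1 (size - 1) size (by omega) (by omega)]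
        exact PySem.List.pyRange_one_append 0 1 size (by omega) (by omega)
      have h2 : PySem.List.pyRange 0 1 1 = [0] := by
        simpa using PySem.List.pyRange_one_singleton 0
      have h3 : PySem.List.pyRange (size - 1) size 1 = [size - 1] := by
        simpa [sub_add_cancel] using PySem.List.pyRange_one_singleton (size - 1)
      generalize hf : (fun y => (PySem.List.pyRange 0 size 1).map (cellA size choices y)) = f
      rw [hsplit, List.flatMap_append, List.flatMap_append, h2, h3,
        List.flatMap_singleton, List.flatMap_singleton]
      have f0 : f 0 = edgeRow size choices 0 := by
        rw [← hf]; exact rowA_edge size choices 0 (Or.inl rfl)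
      have flast : f (size - 1) = edgeRow size choices (size - 1) := by
        rw [← hf]; exact rowA_edge size choices (size - 1) (Or.inr rfl)
      have fmid : (PySem.List.pyRange 1 (size - 1) 1).flatMap f
          = (PySem.List.pyRange 1 (size - 1) 1).flatMap (fun y =>
              [PySem.List.pyGetD choices (PySem.Int.mod y 2) ""]
              ++ List.replicate (size - 2).toNat (PySem.List.pyGetD choices 2 "")
              ++ [PySem.List.pyGetD choices (PySem.Int.mod (size - 1 + y) 2) ""]) := by
        rw [← hf]
        exact List.flatMap_congr (fun y hy => by
          have hy' := (PySem.List.mem_pyRange_one).1 hy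
          exact rowA_interior size choices y (by omega) (by omega))
      rw [f0, flast, fmid]
      simp only [getColour_alt, if_neg h0]
      rw [PySem.List.foldl_append_eq_flatMap]
      rw [if_pos (by omega : size > 1)]
      simp [List.append_assoc]
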